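-- pv_equiv track=rewrite | github.com/wwPDB/py-wwpdb_apps_seqmodule | wwpdb/apps/seqmodule/Archive/SequenceDataUpdate.py | __setPartType
-- ===== SOURCE A (Python) =====
-- def __setPartType(pList,pType):
--     oL=[]
--     pSelectList=['false' for p in pList]
--     if pType is not None and len(pType) > 1:
--         pListU=[p.upper() for p in pList]
--         pTypeU=pType.upper()
--         try:
--             idx = pListU.index(pTypeU)
--             pSelectList[idx]='true'
--         except ValueError:
--             idx = -1
--     tL=[]
--     for pt,psel in zip(pList,pSelectList):
--         tL.append('{"value":"%s","label":"%s","selected":%s}' % (pt,pt,psel))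
--     oL.append('[')
--     oL.append( ','.join(tL) )
--     oL.append(']')
--
--     return ''.join(oL)
-- ===== SOURCE B (Python) =====
-- def __setPartType(pList, pType):
--     valid = pType is not None and len(pType) > 1
--     pTypeU = pType.upper() if valid else None
--     tL = []
--     matched = False
--     for pt in pList:
--         if valid and not matched and pt.upper() == pTypeU:
--             sel = 'true'
--             matched = True
--         else:
--             sel = 'false'
--         tL.append('{"value":"%s","label":"%s","selected":%s}' % (pt, pt, sel))
--     return '[' + ','.join(tL) + ']'
-- ===== Notes on version B (the rewrite author's own statement) =====
-- stated objective: simpler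
-- what changed: Replaces the separate selection list and the upfront uppercased-copy .index scan with a single pass over pList that carries a 'matched' flag and marks only the first case-insensitive match as selected.
import Mathlib
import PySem

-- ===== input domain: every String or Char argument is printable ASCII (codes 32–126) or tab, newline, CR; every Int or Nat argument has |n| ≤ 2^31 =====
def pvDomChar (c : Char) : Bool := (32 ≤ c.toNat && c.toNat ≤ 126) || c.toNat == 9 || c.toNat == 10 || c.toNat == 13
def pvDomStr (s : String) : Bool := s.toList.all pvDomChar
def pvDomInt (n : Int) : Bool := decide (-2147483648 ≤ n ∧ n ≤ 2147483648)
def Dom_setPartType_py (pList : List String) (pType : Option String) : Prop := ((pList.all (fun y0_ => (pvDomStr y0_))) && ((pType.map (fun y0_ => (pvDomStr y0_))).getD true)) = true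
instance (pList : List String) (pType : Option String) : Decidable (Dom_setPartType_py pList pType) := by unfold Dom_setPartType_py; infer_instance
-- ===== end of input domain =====

-- B replaces A's separate selection list and uppercased-copy .index scan by one pass with a 'matched' flag (objective: simpler).

-- shared formatter for one '%'-substituted JSON entry (both Pythons build the identical template string)
def pvFmt (pt : String) (psel : String) : String :=
  PySem.Str.join "" ["{\"value\":\"", pt, "\",\"label\":\"", pt, "\",\"selected\":", psel, "}"]

-- ===== PORT A =====
def setPartType_py (pList : List String) (pType : Option String) : String :=
  let pSelectList : List String := pList.map (fun _ => "false")
  let pSelectList : List String :=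
    match pType with
    | none => pSelectList
    | some t =>
      if 1 < PySem.Str.len t then
        -- try: idx = pListU.index(pTypeU); pSelectList[idx]='true'  except ValueError: pass
        match PySem.List.index? (pList.map (fun p => PySem.Str.upper p)) (PySem.Str.upper t) with
        | some idx => pSelectList.set idx "true"   -- idx from index? is in range
        | none => pSelectList
      else pSelectList
  let tL : List String := (pList.zip pSelectList).map (fun p => pvFmt p.1 p.2)
  PySem.Str.join "" ["[", PySem.Str.join "," tL, "]"]

-- ===== PORT B =====
-- the single pass: 'matched' flag, first case-insensitive match gets 'true'
def pvAltLoop (valid : Bool) (pTypeU : String) : List String → Bool → List String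
  | [], _ => []
  | pt :: rest, matched =>
    if valid && !matched && (PySem.Str.upper pt == pTypeU) then
      pvFmt pt "true" :: pvAltLoop valid pTypeU rest true
    else
      pvFmt pt "false" :: pvAltLoop valid pTypeU rest matched

def setPartType_py_alt (pList : List String) (pType : Option String) : String :=
  let valid : Bool := match pType with | none => false | some t => decide (1 < PySem.Str.len t)
  let pTypeU : String := match pType with | none => "" | some t => PySem.Str.upper t
  PySem.Str.join "" ["[", PySem.Str.join "," (pvAltLoop valid pTypeU pList false), "]"]

-- ===== PRECONDITION & SPEC =====
def Spec_setPartType_py (pList : List String) (pType : Option String) (out : String) : Prop := out = setPartType_py_alt pList pType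
instance (pList : List String) (pType : Option String) (out : String) : Decidable (Spec_setPartType_py pList pType out) := by unfold Spec_setPartType_py; infer_instance

-- ===== CLAIM (what is proved, stated in full; the proofs are below) =====
def Claim_equal_setPartType_py : Prop := ∀ (pList : List String) (pType : Option String), Dom_setPartType_py pList pType → Spec_setPartType_py pList pType (setPartType_py pList pType)

-- ===== LEMMAS AND PROOFS =====

-- once matched (or invalid), the rest of B's pass emits all-'false' entries
lemma pvAltLoop_allFalse (valid : Bool) (u : String) (l : List String) (m : Bool)
    (h : valid = false ∨ m = true) :
    pvAltLoop valid u l m = l.map (fun pt => pvFmt pt "false") := by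
  induction l with
  | nil => rfl
  | cons p rest ih =>
    have hc : (valid && !m && (PySem.Str.upper p == u)) = false := by
      rcases h with h | h <;> simp [h]
    simp [pvAltLoop, hc, ih]

-- zipping a list with a constant copy of itself
lemma pvZipConst (l : List String) : l.zip (l.map (fun _ => "false")) = l.map (fun x => (x, "false")) := by
  induction l with
  | nil => rfl
  | cons p rest ih =>
    simp only [List.map_cons, List.zip_cons_cons]
    rw [ih]

-- A's zip of the list with its set-at-index? selection list equals B's flagged pass
lemma pvMain (u : String) (l : List String) :
    (l.zip (match PySem.List.index? (l.map (fun p => PySem.Str.upper p)) u with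
            | some idx => (l.map (fun _ => "false")).set idx "true"
            | none => l.map (fun _ => "false"))).map (fun p => pvFmt p.1 p.2)
      = pvAltLoop true u l false := by
  induction l with
  | nil => rfl
  | cons p rest ih =>
    by_cases hp : PySem.Str.upper p = u
    · rw [List.map_cons, hp, PySem.List.index?_cons_self]
      simp only [List.set_cons_zero, List.zip_cons_cons, List.map_cons, pvAltLoop, hp]
      simp only [beq_self_eq_true, Bool.not_false, Bool.and_true,
        pvAltLoop_allFalse true u rest true (Or.inr rfl)]
      congr 1
      rw [pvZipConst rest]
      simp
    · rw [List.map_cons, PySem.List.index?_cons_of_ne _ hp]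
      have hup : (PySem.Str.upper p == u) = false := by simp [hp]
      cases hidx : PySem.List.index? (rest.map (fun p => PySem.Str.upper p)) u with
      | none =>
        rw [hidx] at ih
        simp only [Option.map_none, List.zip_cons_cons, List.map_cons]
        rw [pvAltLoop, if_neg (by simp [hup])]
        exact congrArg _ (by simpa using ih)
      | some i =>
        rw [hidx] at ih
        simp only [Option.map_some, List.set_cons_succ, List.zip_cons_cons, List.map_cons]
        rw [pvAltLoop, if_neg (by simp [hup])]
        exact congrArg _ (by simpa using ih)

-- the all-'false' case (pType missing or too short) agrees too
lemma pvAllFalse (l : List String) (valid : Bool) (u : String) (h : valid = false) :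
    (l.zip (l.map (fun _ => "false"))).map (fun p => pvFmt p.1 p.2)
      = pvAltLoop valid u l false := by
  rw [pvAltLoop_allFalse valid u l false (Or.inl h)]
  rw [pvZipConst l]
  simp

-- ===== VERDICT (by name: the statement is the Claim_ definition above) =====
theorem setPartType_py_spec : Claim_equal_setPartType_py := by
  intro pList pType _
  unfold Spec_setPartType_py setPartType_py setPartType_py_alt
  cases pType with
  | none =>
    simp only []
    rw [pvAllFalse pList false "" rfl]
  | some t =>
    by_cases hl : 1 < PySem.Str.len t
    · simp only [if_pos hl, decide_eq_true hl]
      rw [pvMain (PySem.Str.upper t) pList]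
    · simp only [if_neg hl, decide_eq_false hl]
      rw [pvAllFalse pList false (PySem.Str.upper t) rfl]
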